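-- pv_equiv track=rewrite | github.com/harperpack/pacer_docket_parser | parse_to_db.py | seems_like_case_no
-- ===== SOURCE A (Python) =====
-- def seems_like_case_no(value):
--     has_alpha = False
--     has_pair_alpha = False
--     has_num = False
--     has_pair_num = False
--     has_dash = False
--     has_colon = False
--     length = len(value)
--     for i in range(length):
--         char = value[i]
--         if i == length - 1:
--             pair = ''
--         else:
--             pair = char + value[i+1]
--         if char.isalpha():
--             has_alpha = True
--         elif char.isnumeric():
--             has_num = True
--         elif char == '-':
--             has_dash = True
--         elif char == ':':
--             has_colon = True
--         if pair:
--             if pair.isalpha():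
--                 has_pair_alpha = True
--             elif pair.isnumeric():
--                 has_pair_num = True
--         if has_alpha and has_dash:
--             if has_pair_num:
--                 return True
--             elif has_num and has_colon:
--                 return True
--     return False
-- ===== SOURCE B (Python) =====
-- def seems_like_case_no(value):
--     has_alpha = any(c.isalpha() for c in value)
--     has_num = any(c.isnumeric() and not c.isalpha() for c in value)
--     has_dash = any(c == '-' for c in value)
--     has_colon = any(c == ':' for c in value)
--     has_pair_num = any(a.isnumeric() and b.isnumeric() for a, b in zip(value, value[1:]))
--     return has_alpha and has_dash and (has_pair_num or (has_num and has_colon))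
-- ===== Notes on version B (the rewrite author's own statement) =====
-- stated objective: simpler
-- what changed: Replaces the fused stateful loop with six monotone flags and an in-loop early return by five independent any-scans whose results are combined in one final boolean expression (and drops the unused has_pair_alpha flag).
import Mathlib
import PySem

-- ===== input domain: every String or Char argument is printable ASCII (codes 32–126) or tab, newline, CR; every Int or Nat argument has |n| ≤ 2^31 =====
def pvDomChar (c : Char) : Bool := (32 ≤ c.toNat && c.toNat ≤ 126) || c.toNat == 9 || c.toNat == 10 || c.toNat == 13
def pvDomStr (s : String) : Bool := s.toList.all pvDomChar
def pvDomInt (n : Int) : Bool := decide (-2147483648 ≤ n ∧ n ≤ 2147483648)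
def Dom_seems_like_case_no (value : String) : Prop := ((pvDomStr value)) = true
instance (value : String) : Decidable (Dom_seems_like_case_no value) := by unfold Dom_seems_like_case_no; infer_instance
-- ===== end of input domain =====

-- B replaces A's single fused flag loop with early return by five independent any-scans
-- combined once at the end (objective: simpler).

-- ===== PORT A =====
-- A's index loop, transliterated as structural recursion over the character list; the six
-- flags are the loop state, the branch order follows A's if/elif chains, and the in-loop
-- `return True` is the `true` branch.  str.isnumeric is ported as isdigit (exact on the
-- printable-ASCII domain, where the numeric characters are exactly '0'..'9').
def seemsLoopA : List Char → Bool → Bool → Bool → Bool → Bool → Bool → Bool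
  | [], _, _, _, _, _, _ => false
  | c :: rest, ha, hpa, hn, hpn, hd, hc =>
    let s1 :=
      if PySem.Chars.isalpha c then (true, hn, hd, hc)
      else if PySem.Chars.isdigit c then (ha, true, hd, hc)
      else if c == '-' then (ha, hn, true, hc)
      else if c == ':' then (ha, hn, hd, true)
      else (ha, hn, hd, hc)
    let s2 :=
      match rest with
      | [] => (hpa, hpn)                                    -- pair = ''
      | d :: _ =>
        if PySem.Chars.isalpha c && PySem.Chars.isalpha d then (true, hpn)
        else if PySem.Chars.isdigit c && PySem.Chars.isdigit d then (hpa, true)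
        else (hpa, hpn)
    if s1.1 && s1.2.2.1 && (s2.2 || s1.2.1 && s1.2.2.2) then true
    else seemsLoopA rest s1.1 s2.1 s1.2.1 s2.2 s1.2.2.1 s1.2.2.2

def seems_like_case_no (value : String) : Bool :=
  seemsLoopA value.toList false false false false false false

-- ===== PORT B =====
-- Five independent scans, then one boolean combination (Source B; isnumeric = isdigit on ASCII).
def seems_like_case_no_alt (value : String) : Bool :=
  let cs := value.toList
  let has_alpha := cs.any (fun c => PySem.Chars.isalpha c)
  let has_num := cs.any (fun c => PySem.Chars.isdigit c && !PySem.Chars.isalpha c)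
  let has_dash := cs.any (fun c => c == '-')
  let has_colon := cs.any (fun c => c == ':')
  let has_pair_num := (cs.zip cs.tail).any (fun p => PySem.Chars.isdigit p.1 && PySem.Chars.isdigit p.2)
  has_alpha && has_dash && (has_pair_num || has_num && has_colon)

-- ===== PRECONDITION & SPEC =====
def Spec_seems_like_case_no (value : String) (out : Bool) : Prop := out = seems_like_case_no_alt value
instance (value : String) (out : Bool) : Decidable (Spec_seems_like_case_no value out) := by unfold Spec_seems_like_case_no; infer_instance

-- ===== CLAIM (what is proved, stated in full; the proofs are below) =====
def Claim_equal_seems_like_case_no : Prop := ∀ (value : String), Dom_seems_like_case_no value → Spec_seems_like_case_no value (seems_like_case_no value)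

-- ===== LEMMAS AND PROOFS =====

theorem not_alpha_of_digit (c : Char) : PySem.Chars.isdigit c = true → PySem.Chars.isalpha c = false := by
  intro h
  simp only [PySem.Chars.isdigit, Bool.and_eq_true, decide_eq_true_eq, Char.le_def,
    UInt32.le_iff_toNat_le,
    (by decide : ('0').val.toNat = 48), (by decide : ('9').val.toNat = 57)] at h
  simp only [PySem.Chars.isalpha, PySem.Chars.isupper, PySem.Chars.islower, Bool.or_eq_false_iff,
    Bool.and_eq_false_iff, decide_eq_false_iff_not, Char.le_def, UInt32.le_iff_toNat_le, not_le,
    (by decide : ('A').val.toNat = 65), (by decide : ('Z').val.toNat = 90),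
    (by decide : ('a').val.toNat = 97), (by decide : ('z').val.toNat = 122)]
  omega

def pairA (c : Char) : List Char → Bool
  | [] => false
  | d :: _ => PySem.Chars.isalpha c && PySem.Chars.isalpha d

def pairN (c : Char) : List Char → Bool
  | [] => false
  | d :: _ => PySem.Chars.isdigit c && PySem.Chars.isdigit d

-- one loop iteration, with the if/elif chains resolved into monotone flag updates
theorem seemsLoopA_cons (c : Char) (rest : List Char) (ha hpa hn hpn hd hc : Bool) :
    seemsLoopA (c :: rest) ha hpa hn hpn hd hc =
      (if (ha || PySem.Chars.isalpha c) && (hd || (c == '-')) &&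
            ((hpn || pairN c rest) ||
             (hn || (PySem.Chars.isdigit c && !PySem.Chars.isalpha c)) && (hc || (c == ':'))) then
        true
      else
        seemsLoopA rest (ha || PySem.Chars.isalpha c) (hpa || pairA c rest)
          (hn || (PySem.Chars.isdigit c && !PySem.Chars.isalpha c)) (hpn || pairN c rest)
          (hd || (c == '-')) (hc || (c == ':'))) := by
  simp only [seemsLoopA]
  by_cases h1 : PySem.Chars.isalpha c = true <;>
    by_cases h2 : PySem.Chars.isdigit c = true <;>
      by_cases h3 : (c == '-') = true <;> by_cases h4 : (c == ':') = true <;>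
        cases rest with
        | nil =>
          simp_all [pairA, pairN, not_alpha_of_digit,
            (show ∀ a b : Char, (a == b) = decide (a = b) from fun _ _ => rfl),
            (by decide : PySem.Chars.isalpha '-' = false),
            (by decide : PySem.Chars.isdigit '-' = false),
            (by decide : PySem.Chars.isalpha ':' = false),
            (by decide : PySem.Chars.isdigit ':' = false)]
        | cons d t =>
          by_cases h5 : PySem.Chars.isalpha d = true <;>
            by_cases h6 : PySem.Chars.isdigit d = true <;>
              simp_all [pairA, pairN, not_alpha_of_digit,
                (show ∀ a b : Char, (a == b) = decide (a = b) from fun _ _ => rfl),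
                (by decide : PySem.Chars.isalpha '-' = false),
                (by decide : PySem.Chars.isdigit '-' = false),
                (by decide : PySem.Chars.isalpha ':' = false),
                (by decide : PySem.Chars.isdigit ':' = false)]

-- the invariant: from any state whose exit condition is still false, the loop computes the
-- final-flag formula (the flags are monotone, so the early return cannot change the value)
theorem seemsLoopA_eq (cs : List Char) (ha hpa hn hpn hd hc : Bool)
    (h : (ha && hd && (hpn || hn && hc)) = false) :
    seemsLoopA cs ha hpa hn hpn hd hc =
      ((ha || cs.any (fun c => PySem.Chars.isalpha c)) &&
       (hd || cs.any (fun c => c == '-')) &&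
       ((hpn || (cs.zip cs.tail).any
            (fun p => PySem.Chars.isdigit p.1 && PySem.Chars.isdigit p.2)) ||
        (hn || cs.any (fun c => PySem.Chars.isdigit c && !PySem.Chars.isalpha c)) &&
        (hc || cs.any (fun c => c == ':')))) := by
  induction cs generalizing ha hpa hn hpn hd hc with
  | nil =>
    show false = _
    simp only [List.any_nil, List.zip_nil_left, Bool.or_false]
    exact h.symm
  | cons c rest ih =>
    rw [seemsLoopA_cons]
    by_cases hcond : ((ha || PySem.Chars.isalpha c) && (hd || (c == '-')) &&
        ((hpn || pairN c rest) ||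
         (hn || (PySem.Chars.isdigit c && !PySem.Chars.isalpha c)) && (hc || (c == ':')))) = true
    · rw [if_pos hcond]
      refine Eq.symm ?_
      cases rest with
      | nil =>
        simp only [pairN, Bool.or_false, Bool.and_eq_true, Bool.or_eq_true] at hcond
        simp only [List.any_cons, List.any_nil, List.zip_nil_right, List.tail_cons,
          Bool.or_false, Bool.and_eq_true, Bool.or_eq_true]
        tauto
      | cons d t =>
        simp only [pairN, Bool.and_eq_true, Bool.or_eq_true] at hcond
        simp only [List.any_cons, List.tail_cons, List.zip_cons_cons, Bool.and_eq_true,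
          Bool.or_eq_true]
        tauto
    · rw [if_neg (by simpa using hcond), ih _ _ _ _ _ _ (by simpa using hcond)]
      cases rest with
      | nil => simp [pairN]
      | cons d t =>
        simp only [pairN, List.any_cons, List.tail_cons, List.zip_cons_cons, Bool.or_assoc]

-- ===== VERDICT (by name: the statement is the Claim_ definition above) =====
theorem seems_like_case_no_spec : Claim_equal_seems_like_case_no := by
  intro value _
  unfold Spec_seems_like_case_no seems_like_case_no seems_like_case_no_alt
  rw [seemsLoopA_eq _ _ _ _ _ _ _ rfl]
  simp
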